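-- pv_equiv track=rewrite | github.com/jhuapl-bio/taxtriage | bin/merge_subspecies.py | count_double_spaces
-- ===== SOURCE A (Python) =====
-- def count_double_spaces(line):
--     double_space_count = 0
--     index = 0
--     while index < len(line) - 1:
--         if line[index] == ' ' and line[index + 1] == ' ':
--             double_space_count += 1
--             index += 2
--         else:
--             break
--     return double_space_count
-- ===== SOURCE B (Python) =====
-- def count_double_spaces(line):
--     n = len(line) - len(line.lstrip(' '))
--     return n // 2
-- ===== Notes on version B (the rewrite author's own statement) =====
-- stated objective: simpler
-- what changed: Replaces the explicit while-loop that steps two characters at a time with a closed form: the length of the leading run of spaces (via lstrip) floor-divided by 2.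
import Mathlib
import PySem

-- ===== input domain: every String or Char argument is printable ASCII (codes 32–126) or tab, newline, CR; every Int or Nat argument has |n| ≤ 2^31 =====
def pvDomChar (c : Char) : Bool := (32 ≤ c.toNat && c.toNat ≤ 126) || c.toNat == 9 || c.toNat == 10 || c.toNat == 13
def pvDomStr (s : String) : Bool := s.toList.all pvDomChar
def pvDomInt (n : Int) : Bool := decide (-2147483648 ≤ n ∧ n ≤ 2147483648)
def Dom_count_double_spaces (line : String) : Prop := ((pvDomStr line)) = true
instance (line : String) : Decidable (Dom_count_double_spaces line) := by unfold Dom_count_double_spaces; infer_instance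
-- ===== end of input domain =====

-- B replaces A's explicit pair-by-pair while-loop with a closed form: (length of the leading run of spaces) // 2 (objective: simpler).


-- ===== PORT A =====
-- the while-loop: consume a leading ' '' ' pair (index += 2, count += 1) or break
def pvALoop : List Char → Int
  | ' ' :: ' ' :: rest => pvALoop rest + 1
  | _ => 0

def count_double_spaces (line : String) : Int := pvALoop line.toList

-- ===== PORT B =====
-- line.lstrip(' ') ported by hand as dropWhile (· == ' ') on the code points (exact: lstrip(' ') removes exactly the leading spaces)
def count_double_spaces_alt (line : String) : Int :=
  let n : Int := (line.toList.length : Int) - ((line.toList.dropWhile (· == ' ')).length : Int)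
  PySem.Int.floordiv n 2

-- ===== PRECONDITION & SPEC =====
def Spec_count_double_spaces (line : String) (out : Int) : Prop := out = count_double_spaces_alt line
instance (line : String) (out : Int) : Decidable (Spec_count_double_spaces line out) := by unfold Spec_count_double_spaces; infer_instance

-- ===== CLAIM (what is proved, stated in full; the proofs are below) =====
def Claim_equal_count_double_spaces : Prop := ∀ (line : String), Dom_count_double_spaces line → Spec_count_double_spaces line (count_double_spaces line)

-- ===== LEMMAS AND PROOFS =====
theorem pvALoop_eq (l : List Char) : pvALoop l = ((l.takeWhile (· == ' ')).length / 2 : Nat) := by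
  fun_induction pvALoop l with
  | case1 rest ih =>
    simp only [List.takeWhile, ih]
    norm_num
    omega
  | case2 l h =>
    match l with
    | [] => simp [List.takeWhile]
    | [c] =>
      by_cases hc : (c == ' ') = true <;> simp [List.takeWhile, hc]
    | c1 :: c2 :: rest =>
      by_cases h1 : (c1 == ' ') = true
      · by_cases h2 : (c2 == ' ') = true
        · exact absurd (by rw [eq_of_beq h1, eq_of_beq h2]) (h rest)
        · simp [List.takeWhile, h1, h2]
      · simp [List.takeWhile, h1]

theorem dropWhile_len (l : List Char) :
    (l.length : Int) - ((l.dropWhile (· == ' ')).length : Int) = ((l.takeWhile (· == ' ')).length : Int) := by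
  have hlen : (l.takeWhile (· == ' ')).length + (l.dropWhile (· == ' ')).length = l.length := by
    rw [← List.length_append, List.takeWhile_append_dropWhile]
  omega

theorem floordiv_natCast_two (k : Nat) : PySem.Int.floordiv (k : Int) 2 = ((k / 2 : Nat) : Int) := by
  simp [PySem.Int.floordiv]
  exact Int.fdiv_eq_ediv_of_nonneg _ (by norm_num)

-- ===== VERDICT (by name: the statement is the Claim_ definition above) =====
theorem count_double_spaces_spec : Claim_equal_count_double_spaces := by
  intro line _
  unfold Spec_count_double_spaces count_double_spaces count_double_spaces_alt
  rw [dropWhile_len, pvALoop_eq, floordiv_natCast_two]
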